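-- pv_equiv track=rewrite | github.com/gabe-silva/poker_analyzer | trainer/scenario.py | _ordered_roles_for_hero_to_act
-- ===== SOURCE A (Python) =====
-- from typing import Dict, List, Optional
--
-- def _ordered_roles_for_hero_to_act(
--     requested_context: str,
--     active_order: List[str],
--     hero_position: str,
-- ) -> tuple[Dict[str, str], str]:
--     """
--     Assign bettor/caller in legal order so hero acts next.
--
--     Returns:
--         (roles, resolved_action_context)
--     """
--     roles = {p: "waiting" for p in active_order}
--     roles[hero_position] = "hero_to_act"
--
--     if hero_position not in active_order:
--         return roles, "checked_to_hero"
--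
--     hero_idx = active_order.index(hero_position)
--     prefix = active_order[:hero_idx]  # players who act before hero
--
--     if requested_context == "facing_bet_and_call":
--         if len(prefix) >= 2:
--             bettor = prefix[-2]
--             caller = prefix[-1]
--             roles[bettor] = "bettor"
--             roles[caller] = "caller"
--             return roles, "facing_bet_and_call"
--         if len(prefix) >= 1:
--             bettor = prefix[-1]
--             roles[bettor] = "bettor"
--             return roles, "facing_bet"
--         return roles, "checked_to_hero"
--
--     if requested_context == "facing_bet":
--         if len(prefix) >= 1:
--             bettor = prefix[-1]
--             roles[bettor] = "bettor"
--             return roles, "facing_bet"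
--         return roles, "checked_to_hero"
--
--     return roles, "checked_to_hero"
-- ===== SOURCE B (Python) =====
-- def _ordered_roles_for_hero_to_act(requested_context, active_order, hero_position):
--     """Single forward scan with two trailing registers (no index()/slicing):
--     remember the last two players seen before hero, then build the roles map
--     in one pass and patch hero in if absent."""
--     prev2 = prev1 = None
--     found = False
--     for p in active_order:
--         if p == hero_position:
--             found = True
--             break
--         prev2, prev1 = prev1, p
--     special, ctx = {}, "checked_to_hero"
--     if found and requested_context == "facing_bet_and_call" and prev2 is not None:
--         special, ctx = {prev2: "bettor", prev1: "caller"}, "facing_bet_and_call"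
--     elif found and requested_context in ("facing_bet_and_call", "facing_bet") and prev1 is not None:
--         special, ctx = {prev1: "bettor"}, "facing_bet"
--     roles = {}
--     for p in active_order:
--         roles[p] = "hero_to_act" if p == hero_position else special.get(p, "waiting")
--     roles.setdefault(hero_position, "hero_to_act")
--     return roles, ctx
-- ===== Notes on version B (the rewrite author's own statement) =====
-- stated objective: alternative
-- what changed: Replaces index()/slicing/negative indexing and the mutate-then-early-return ladder by a single forward scan that carries two trailing registers (the last two players seen before hero), picks roles and context from those registers, then builds the roles dict in one pass over the order with a final setdefault for an absent hero.
import Mathlib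
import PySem

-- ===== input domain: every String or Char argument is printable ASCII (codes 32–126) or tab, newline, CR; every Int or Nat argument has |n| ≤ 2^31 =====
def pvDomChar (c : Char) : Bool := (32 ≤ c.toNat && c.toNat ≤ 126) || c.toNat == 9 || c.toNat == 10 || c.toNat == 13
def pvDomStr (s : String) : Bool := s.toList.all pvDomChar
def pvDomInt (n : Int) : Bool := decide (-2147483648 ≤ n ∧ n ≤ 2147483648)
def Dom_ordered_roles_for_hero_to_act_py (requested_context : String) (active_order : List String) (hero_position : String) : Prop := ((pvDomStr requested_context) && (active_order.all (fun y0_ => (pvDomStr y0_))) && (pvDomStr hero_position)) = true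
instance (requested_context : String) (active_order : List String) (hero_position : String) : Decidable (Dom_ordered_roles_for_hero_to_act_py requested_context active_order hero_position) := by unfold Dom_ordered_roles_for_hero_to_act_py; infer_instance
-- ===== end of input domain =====

-- B replaces A's index()/slice/negative-indexing branch ladder by a single forward scan
-- carrying two trailing registers and one pass building the roles dict; objective: alternative decomposition.


-- ===== PORT A =====
def ordered_roles_for_hero_to_act_py (requested_context : String) (active_order : List String) (hero_position : String) : (List (String × String)) × String :=
  let roles0 := active_order.foldl (fun d p => d.insert p "waiting") PySem.Dict.empty
  let roles := roles0.insert hero_position "hero_to_act"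
  if hero_position ∈ active_order then
    let hero_idx : Nat := (PySem.List.index? active_order hero_position).getD 0
    let pre := PySem.List.slice active_order none (some (hero_idx : Int))
    if requested_context = "facing_bet_and_call" then
      if pre.length ≥ 2 then
        let bettor := PySem.List.pyGetD pre (-2) ""
        let caller := PySem.List.pyGetD pre (-1) ""
        (((roles.insert bettor "bettor").insert caller "caller").items, "facing_bet_and_call")
      else if pre.length ≥ 1 then
        let bettor := PySem.List.pyGetD pre (-1) ""
        ((roles.insert bettor "bettor").items, "facing_bet")
      else (roles.items, "checked_to_hero")
    else if requested_context = "facing_bet" then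
      if pre.length ≥ 1 then
        let bettor := PySem.List.pyGetD pre (-1) ""
        ((roles.insert bettor "bettor").items, "facing_bet")
      else (roles.items, "checked_to_hero")
    else (roles.items, "checked_to_hero")
  else (roles.items, "checked_to_hero")

-- ===== PORT B =====
-- the 'for p in active_order: if p == hero: found; break; prev2, prev1 = prev1, p' scan
def pvScan (hp : String) : List String → Option String → Option String → Option String × Option String × Bool
  | [], p2, p1 => (p2, p1, false)
  | p :: t, p2, p1 => if p = hp then (p2, p1, true) else pvScan hp t p1 (some p)

def ordered_roles_for_hero_to_act_py_alt (requested_context : String) (active_order : List String) (hero_position : String) : (List (String × String)) × String :=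
  let s := pvScan hero_position active_order none none
  let sc : PySem.Dict String String × String :=
    if s.2.2 = true ∧ requested_context = "facing_bet_and_call" ∧ s.1.isSome = true then
      ((PySem.Dict.empty.insert (s.1.getD "") "bettor").insert (s.2.1.getD "") "caller", "facing_bet_and_call")
    else if s.2.2 = true ∧ (requested_context = "facing_bet_and_call" ∨ requested_context = "facing_bet") ∧ s.2.1.isSome = true then
      (PySem.Dict.empty.insert (s.2.1.getD "") "bettor", "facing_bet")
    else (PySem.Dict.empty, "checked_to_hero")
  let roles0 := active_order.foldl (fun d p => d.insert p (if p = hero_position then "hero_to_act" else sc.1.getD p "waiting")) PySem.Dict.empty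
  let roles := if roles0.contains hero_position then roles0 else roles0.insert hero_position "hero_to_act"
  (roles.items, sc.2)

-- ===== PRECONDITION & SPEC =====
def Spec_ordered_roles_for_hero_to_act_py (requested_context : String) (active_order : List String) (hero_position : String) (out : (List (String × String)) × String) : Prop := out = ordered_roles_for_hero_to_act_py_alt requested_context active_order hero_position
instance (requested_context : String) (active_order : List String) (hero_position : String) (out : (List (String × String)) × String) : Decidable (Spec_ordered_roles_for_hero_to_act_py requested_context active_order hero_position out) := by unfold Spec_ordered_roles_for_hero_to_act_py; infer_instance

-- ===== CLAIM (what is proved, stated in full; the proofs are below) =====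
def Claim_equal_ordered_roles_for_hero_to_act_py : Prop := ∀ (requested_context : String) (active_order : List String) (hero_position : String), Dom_ordered_roles_for_hero_to_act_py requested_context active_order hero_position → Spec_ordered_roles_for_hero_to_act_py requested_context active_order hero_position (ordered_roles_for_hero_to_act_py requested_context active_order hero_position)

-- ===== LEMMAS AND PROOFS =====

-- the scan characterised on a decomposition ao = P ++ hero :: suf with hero ∉ P
theorem pvScan_spec (hp : String) (suf : List String) (P : List String) :
    ∀ (p2 p1 : Option String), hp ∉ P →
    pvScan hp (P ++ hp :: suf) p2 p1 =
      (match P.reverse with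
       | [] => (p2, p1, true)
       | [a] => (p1, some a, true)
       | a :: b :: _ => (some b, some a, true)) := by
  induction P with
  | nil => intro p2 p1 _; simp [pvScan]
  | cons x t ih =>
      intro p2 p1 h
      have hx : ¬ x = hp := fun e => h (by simp [e])
      have ht : hp ∉ t := fun e => h (by simp [e])
      rw [List.cons_append, pvScan, if_neg hx, ih p1 (some x) ht, List.reverse_cons]
      rcases htr : t.reverse with _ | ⟨a, _ | ⟨b, r⟩⟩ <;> simp

theorem pvScan_not_mem (hp : String) : ∀ (l : List String) (p2 p1 : Option String), hp ∉ l →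
    (pvScan hp l p2 p1).2.2 = false := by
  intro l
  induction l with
  | nil => intro _ _ _; rfl
  | cons x t ih =>
      intro p2 p1 h
      have hx : ¬ x = hp := fun e => h (by simp [e])
      rw [pvScan, if_neg hx]
      exact ih p1 (some x) (fun e => h (by simp [e]))

-- the "waiting"-initialisation loop, pointwise
theorem pvGetD_fold_waiting (l : List String) (d : PySem.Dict String String) (k x : String) :
    (l.foldl (fun d p => d.insert p "waiting") d).getD k x
      = if k ∈ l then "waiting" else d.getD k x := by
  induction l generalizing d with
  | nil => simp
  | cons a t ih =>
      simp only [List.foldl_cons, ih, PySem.Dict.getD_insert, List.mem_cons]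
      by_cases hk : k ∈ t <;> by_cases ha : k = a <;> simp [hk, ha]

theorem pvKeys_fold_waiting (l : List String) :
    (l.foldl (fun d p => d.insert p "waiting") PySem.Dict.empty).keys = PySem.List.dedup l := by
  rw [PySem.Dict.keys_foldl_insert]
  simp [PySem.Set.update_nil_left]

-- B's one-pass build of the roles dict, pointwise (value depends only on the key)
theorem pvGetD_fold_gen (F : String → String) (l : List String) (d : PySem.Dict String String) (k x : String) :
    (l.foldl (fun d p => d.insert p (F p)) d).getD k x
      = if k ∈ l then F k else d.getD k x := by
  induction l generalizing d with
  | nil => simp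
  | cons a t ih =>
      simp only [List.foldl_cons, ih, PySem.Dict.getD_insert, List.mem_cons]
      by_cases hk : k ∈ t <;> by_cases ha : k = a <;> simp [hk, ha]

theorem pvKeys_fold_gen (F : String → String) (l : List String) :
    (l.foldl (fun d p => d.insert p (F p)) PySem.Dict.empty).keys = PySem.List.dedup l := by
  rw [PySem.Dict.keys_foldl_insert]
  simp [PySem.Set.update_nil_left]

-- items of a Nodup-keyed dict as a map over a named key list
theorem pvItems_eq_map (F : PySem.Dict String String) (keys : List String)
    (h1 : F.keys = keys) (h2 : F.keys.Nodup) (f : String → String)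
    (hf : ∀ k0 ∈ keys, F.getD k0 "" = f k0) :
    F.items = keys.map (fun k0 => (k0, f k0)) := by
  rw [PySem.Dict.items_eq_map_keys F h2 "", h1]
  exact List.map_congr_left (fun k0 hk0 => by rw [hf k0 hk0])

theorem pvItemsB (F : String → String) (ao : List String) :
    (ao.foldl (fun d p => d.insert p (F p)) PySem.Dict.empty).items
      = (PySem.List.dedup ao).map (fun p => (p, F p)) := by
  apply pvItems_eq_map _ _ (pvKeys_fold_gen F ao)
    (by rw [pvKeys_fold_gen]; exact PySem.List.nodup_dedup ao)
  intro k0 hk0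
  rw [pvGetD_fold_gen, if_pos ((PySem.List.mem_dedup ao k0).mp hk0)]

-- B's roles (one-pass dict + setdefault) as a canonical map over the key order
theorem pvRolesB (S : PySem.Dict String String) (ao : List String) (hp : String) :
    (if (ao.foldl (fun d p => d.insert p (if p = hp then "hero_to_act" else S.getD p "waiting")) PySem.Dict.empty).contains hp
     then ao.foldl (fun d p => d.insert p (if p = hp then "hero_to_act" else S.getD p "waiting")) PySem.Dict.empty
     else (ao.foldl (fun d p => d.insert p (if p = hp then "hero_to_act" else S.getD p "waiting")) PySem.Dict.empty).insert hp "hero_to_act").items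
    = (if hp ∈ ao then PySem.List.dedup ao else PySem.List.dedup ao ++ [hp]).map
        (fun p => (p, if p = hp then "hero_to_act" else S.getD p "waiting")) := by
  by_cases hm : hp ∈ ao
  · have hc : (ao.foldl (fun d p => d.insert p (if p = hp then "hero_to_act" else S.getD p "waiting")) PySem.Dict.empty).contains hp = true := by
      rw [PySem.Dict.contains_iff_mem_keys, pvKeys_fold_gen, PySem.List.mem_dedup]; exact hm
    rw [if_pos hc, if_pos hm]
    exact pvItemsB _ ao
  · have hc : (ao.foldl (fun d p => d.insert p (if p = hp then "hero_to_act" else S.getD p "waiting")) PySem.Dict.empty).contains hp = false := by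
      rw [← Bool.not_eq_true, PySem.Dict.contains_iff_mem_keys, pvKeys_fold_gen, PySem.List.mem_dedup]; exact hm
    rw [if_neg (by simp [hc]), if_neg hm,
      PySem.Dict.items_insert_of_not_contains _ _ hc, pvItemsB _ ao, List.map_append]
    simp

-- xs[-1] and xs[-2] on an explicit two-element tail
theorem pvGetD_neg_one_append_pair (l : List String) (b a d : String) :
    PySem.List.pyGetD (l ++ [b, a]) (-1) d = a := by
  rw [show l ++ [b, a] = (l ++ [b]) ++ [a] by simp]
  exact PySem.List.pyGetD_neg_one_append_singleton _ _ _

theorem pvGetD_neg_two_append_pair (l : List String) (b a d : String) :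
    PySem.List.pyGetD (l ++ [b, a]) (-2) d = b := by
  rw [PySem.List.pyGetD_neg_ofNat (l ++ [b, a]) 2 d (by omega) (by simp)]
  have h : (l ++ [b, a]).length - 2 = l.length := by simp
  simp [List.getElem_append_right]

-- items of A's final dict in the three realized shapes, as a single map
theorem pvItems_two (ao : List String) (hp b c : String)
    (hmem : hp ∈ ao) (hb : b ∈ ao) (hc : c ∈ ao) (hbhp : b ≠ hp) (hchp : c ≠ hp) :
    ((((ao.foldl (fun d p => d.insert p "waiting") PySem.Dict.empty).insert hp "hero_to_act").insert b "bettor").insert c "caller").items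
      = (PySem.List.dedup ao).map (fun p => (p, if p = hp then "hero_to_act"
          else ((PySem.Dict.empty.insert b "bettor").insert c "caller").getD p "waiting")) := by
  have hcon : ∀ (D : PySem.Dict String String) (x : String), D.keys = PySem.List.dedup ao → x ∈ ao → D.contains x = true := by
    intro D x hD hx
    rw [PySem.Dict.contains_iff_mem_keys, hD, PySem.List.mem_dedup]; exact hx
  have h0k := pvKeys_fold_waiting ao
  have h1k : ((ao.foldl (fun d p => d.insert p "waiting") PySem.Dict.empty).insert hp "hero_to_act").keys = PySem.List.dedup ao := by
    rw [PySem.Dict.keys_insert_of_contains _ _ (hcon _ _ h0k hmem)]; exact h0k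
  have h2k : (((ao.foldl (fun d p => d.insert p "waiting") PySem.Dict.empty).insert hp "hero_to_act").insert b "bettor").keys = PySem.List.dedup ao := by
    rw [PySem.Dict.keys_insert_of_contains _ _ (hcon _ _ h1k hb)]; exact h1k
  have h3k : ((((ao.foldl (fun d p => d.insert p "waiting") PySem.Dict.empty).insert hp "hero_to_act").insert b "bettor").insert c "caller").keys = PySem.List.dedup ao := by
    rw [PySem.Dict.keys_insert_of_contains _ _ (hcon _ _ h2k hc)]; exact h2k
  apply pvItems_eq_map _ _ h3k (by rw [h3k]; exact PySem.List.nodup_dedup ao)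
  intro k0 hk0
  have hk0ao : k0 ∈ ao := (PySem.List.mem_dedup ao k0).mp hk0
  simp only [PySem.Dict.getD_insert, PySem.Dict.getD_empty, pvGetD_fold_waiting, hk0ao, if_true]
  by_cases e1 : k0 = c <;> by_cases e2 : k0 = b <;> by_cases e3 : k0 = hp <;> simp_all

theorem pvItems_one (ao : List String) (hp b : String)
    (hmem : hp ∈ ao) (hb : b ∈ ao) (hbhp : b ≠ hp) :
    (((ao.foldl (fun d p => d.insert p "waiting") PySem.Dict.empty).insert hp "hero_to_act").insert b "bettor").items
      = (PySem.List.dedup ao).map (fun p => (p, if p = hp then "hero_to_act"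
          else (PySem.Dict.empty.insert b "bettor").getD p "waiting")) := by
  have hcon : ∀ (D : PySem.Dict String String) (x : String), D.keys = PySem.List.dedup ao → x ∈ ao → D.contains x = true := by
    intro D x hD hx
    rw [PySem.Dict.contains_iff_mem_keys, hD, PySem.List.mem_dedup]; exact hx
  have h0k := pvKeys_fold_waiting ao
  have h1k : ((ao.foldl (fun d p => d.insert p "waiting") PySem.Dict.empty).insert hp "hero_to_act").keys = PySem.List.dedup ao := by
    rw [PySem.Dict.keys_insert_of_contains _ _ (hcon _ _ h0k hmem)]; exact h0k
  have h2k : (((ao.foldl (fun d p => d.insert p "waiting") PySem.Dict.empty).insert hp "hero_to_act").insert b "bettor").keys = PySem.List.dedup ao := by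
    rw [PySem.Dict.keys_insert_of_contains _ _ (hcon _ _ h1k hb)]; exact h1k
  apply pvItems_eq_map _ _ h2k (by rw [h2k]; exact PySem.List.nodup_dedup ao)
  intro k0 hk0
  have hk0ao : k0 ∈ ao := (PySem.List.mem_dedup ao k0).mp hk0
  simp only [PySem.Dict.getD_insert, PySem.Dict.getD_empty, pvGetD_fold_waiting, hk0ao, if_true]
  by_cases e2 : k0 = b <;> by_cases e3 : k0 = hp <;> simp_all

theorem pvItems_zero (ao : List String) (hp : String) (hmem : hp ∈ ao) :
    ((ao.foldl (fun d p => d.insert p "waiting") PySem.Dict.empty).insert hp "hero_to_act").items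
      = (PySem.List.dedup ao).map (fun p => (p, if p = hp then "hero_to_act"
          else PySem.Dict.empty.getD p "waiting")) := by
  have hcon : ((ao.foldl (fun d p => d.insert p "waiting") PySem.Dict.empty)).contains hp = true := by
    rw [PySem.Dict.contains_iff_mem_keys, pvKeys_fold_waiting, PySem.List.mem_dedup]; exact hmem
  have h1k : ((ao.foldl (fun d p => d.insert p "waiting") PySem.Dict.empty).insert hp "hero_to_act").keys = PySem.List.dedup ao := by
    rw [PySem.Dict.keys_insert_of_contains _ _ hcon]; exact pvKeys_fold_waiting ao
  apply pvItems_eq_map _ _ h1k (by rw [h1k]; exact PySem.List.nodup_dedup ao)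
  intro k0 hk0
  have hk0ao : k0 ∈ ao := (PySem.List.mem_dedup ao k0).mp hk0
  simp only [PySem.Dict.getD_insert, PySem.Dict.getD_empty, pvGetD_fold_waiting, hk0ao, if_true]

theorem pvItems_absent (ao : List String) (hp : String) (hmem : hp ∉ ao) :
    ((ao.foldl (fun d p => d.insert p "waiting") PySem.Dict.empty).insert hp "hero_to_act").items
      = (PySem.List.dedup ao ++ [hp]).map (fun p => (p, if p = hp then "hero_to_act"
          else PySem.Dict.empty.getD p "waiting")) := by
  have hcon : ((ao.foldl (fun d p => d.insert p "waiting") PySem.Dict.empty)).contains hp = false := by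
    rw [← Bool.not_eq_true, PySem.Dict.contains_iff_mem_keys, pvKeys_fold_waiting, PySem.List.mem_dedup]
    exact hmem
  rw [PySem.Dict.items_insert_of_not_contains _ _ hcon, List.map_append]
  have h0 : (ao.foldl (fun d p => d.insert p "waiting") PySem.Dict.empty).items
      = (PySem.List.dedup ao).map (fun k0 => (k0, "waiting")) :=
    pvItems_eq_map _ _ (pvKeys_fold_waiting ao)
      (by rw [pvKeys_fold_waiting]; exact PySem.List.nodup_dedup ao) _
      (fun k0 hk0 => by
        rw [pvGetD_fold_waiting, if_pos ((PySem.List.mem_dedup ao k0).mp hk0)])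
  rw [h0]
  have : ∀ p ∈ PySem.List.dedup ao,
      ((p, "waiting") : String × String) = (p, if p = hp then "hero_to_act" else PySem.Dict.empty.getD p "waiting") := by
    intro p hp0
    have : p ≠ hp := fun h => hmem (h ▸ (PySem.List.mem_dedup ao p).mp hp0)
    simp [this]
  rw [List.map_congr_left this]
  simp

-- ===== VERDICT (by name: the statement is the Claim_ definition above) =====
theorem ordered_roles_for_hero_to_act_py_spec : Claim_equal_ordered_roles_for_hero_to_act_py := by
  intro rc ao hp _
  unfold Spec_ordered_roles_for_hero_to_act_py ordered_roles_for_hero_to_act_py ordered_roles_for_hero_to_act_py_alt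
  by_cases hmem : hp ∈ ao
  · obtain ⟨k, hk⟩ := Option.isSome_iff_exists.mp ((PySem.List.index?_isSome_iff ao hp).mpr hmem)
    obtain ⟨P, suf, hao, hlenP, hhpP⟩ := (PySem.List.index?_eq_some_iff ao hp k).mp hk
    have hpre : PySem.List.slice ao none (some ((k : Nat) : Int)) = P := by
      rw [PySem.List.slice_to_natCast, ← hlenP, hao, List.take_left]
    have hscan := pvScan_spec hp suf P none none hhpP
    rw [← hao] at hscan
    have hPao : ∀ x, x ∈ P → x ∈ ao := fun x hx => hao ▸ List.mem_append_left _ hx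
    rcases hrev : P.reverse with _ | ⟨a, _ | ⟨b, r⟩⟩
    · -- prefix empty: both sides end in checked_to_hero
      have hP : P = [] := by simpa using congrArg List.reverse hrev
      subst hP
      rw [hrev] at hscan
      simp only [hscan, if_pos hmem, hk, Option.getD_some, hpre, Option.isSome_none,
        Bool.false_eq_true, and_false, if_false]
      rw [pvRolesB PySem.Dict.empty ao hp, if_pos hmem]
      by_cases h1 : rc = "facing_bet_and_call"
      · rw [if_pos h1, if_neg (show ¬(([] : List String).length ≥ 2) by simp),
          if_neg (show ¬(([] : List String).length ≥ 1) by simp)]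
        exact Prod.ext (pvItems_zero ao hp hmem) rfl
      · rw [if_neg h1]
        by_cases h2 : rc = "facing_bet"
        · rw [if_pos h2, if_neg (show ¬(([] : List String).length ≥ 1) by simp)]
          exact Prod.ext (pvItems_zero ao hp hmem) rfl
        · rw [if_neg h2]
          exact Prod.ext (pvItems_zero ao hp hmem) rfl
    · -- exactly one player before hero: at most a bettor
      have hP : P = [a] := by simpa using congrArg List.reverse hrev
      subst hP
      rw [hrev] at hscan
      have ha : a ∈ ao := hPao a (by simp)
      have hahp : a ≠ hp := fun e => hhpP (by simp [e])
      have hlast : PySem.List.pyGetD [a] (-1) "" = a := by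
        simpa using PySem.List.pyGetD_neg_one_append_singleton ([] : List String) a ""
      simp only [hscan, if_pos hmem, hk, Option.getD_some, hpre, Option.isSome_none,
        Option.isSome_some, Option.getD_some, hlast,
        Bool.false_eq_true, and_false, and_true, true_and, if_false]
      by_cases h1 : rc = "facing_bet_and_call"
      · rw [if_pos (show rc = "facing_bet_and_call" ∨ rc = "facing_bet" from Or.inl h1),
          if_pos h1, if_neg (show ¬(([a] : List String).length ≥ 2) by simp),
          if_pos (show ([a] : List String).length ≥ 1 by simp)]
        rw [pvRolesB (PySem.Dict.empty.insert a "bettor") ao hp, if_pos hmem]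
        exact Prod.ext (pvItems_one ao hp a hmem ha hahp) rfl
      · rw [if_neg h1]
        by_cases h2 : rc = "facing_bet"
        · rw [if_pos (show rc = "facing_bet_and_call" ∨ rc = "facing_bet" from Or.inr h2),
            if_pos h2, if_pos (show ([a] : List String).length ≥ 1 by simp)]
          rw [pvRolesB (PySem.Dict.empty.insert a "bettor") ao hp, if_pos hmem]
          exact Prod.ext (pvItems_one ao hp a hmem ha hahp) rfl
        · rw [if_neg (show ¬(rc = "facing_bet_and_call" ∨ rc = "facing_bet") from
              fun h => h.elim h1 h2), if_neg h2]
          rw [pvRolesB PySem.Dict.empty ao hp, if_pos hmem]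
          exact Prod.ext (pvItems_zero ao hp hmem) rfl
    · -- at least two players before hero
      have hP : P = r.reverse ++ [b, a] := by simpa using congrArg List.reverse hrev
      have hlen : P.length = r.length + 2 := by rw [hP]; simp
      have hlast : PySem.List.pyGetD P (-1) "" = a := by
        rw [hP]; exact pvGetD_neg_one_append_pair _ _ _ _
      have hlast2 : PySem.List.pyGetD P (-2) "" = b := by
        rw [hP]; exact pvGetD_neg_two_append_pair _ _ _ _
      have ha : a ∈ ao := hPao a (by rw [hP]; simp)
      have hb : b ∈ ao := hPao b (by rw [hP]; simp)
      have hahp : a ≠ hp := fun e => hhpP (by rw [hP]; simp [e])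
      have hbhp : b ≠ hp := fun e => hhpP (by rw [hP]; simp [e])
      rw [hrev] at hscan
      simp only [hscan, if_pos hmem, hk, Option.getD_some, hpre,
        Option.isSome_some, Option.getD_some, hlast, hlast2, and_true, true_and]
      by_cases h1 : rc = "facing_bet_and_call"
      · simp only [if_pos h1]
        rw [if_pos (show P.length ≥ 2 by omega)]
        rw [pvRolesB ((PySem.Dict.empty.insert b "bettor").insert a "caller") ao hp, if_pos hmem]
        exact Prod.ext (pvItems_two ao hp b a hmem hb ha hbhp hahp) rfl
      · simp only [if_neg h1]
        by_cases h2 : rc = "facing_bet"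
        · rw [if_pos (show rc = "facing_bet_and_call" ∨ rc = "facing_bet" from Or.inr h2),
            if_pos h2, if_pos (show P.length ≥ 1 by omega)]
          rw [pvRolesB (PySem.Dict.empty.insert a "bettor") ao hp, if_pos hmem]
          exact Prod.ext (pvItems_one ao hp a hmem ha hahp) rfl
        · rw [if_neg (show ¬(rc = "facing_bet_and_call" ∨ rc = "facing_bet") from
              fun h => h.elim h1 h2), if_neg h2]
          rw [pvRolesB PySem.Dict.empty ao hp, if_pos hmem]
          exact Prod.ext (pvItems_zero ao hp hmem) rfl
  · -- hero not in the order: the scan never finds him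
    have hsc := pvScan_not_mem hp ao none none hmem
    simp only [if_neg hmem, hsc, Bool.false_eq_true, false_and, if_false]
    rw [pvRolesB PySem.Dict.empty ao hp, if_neg hmem]
    exact Prod.ext (pvItems_absent ao hp hmem) rfl
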